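-- pv_equiv track=rewrite | github.com/MrBrantCode/unitest_baseline | mut_generate/mist_train_cf/cf_17599/solution.py | count_distinct_substrings
-- ===== SOURCE A (Python) =====
-- def count_distinct_substrings(string):
--     n = len(string)
--     counter = 0
--     distinct_set = set()
--
--     left = 0
--     right = 0
--
--     while right < n:
--         if string[right] not in distinct_set:
--             distinct_set.add(string[right])
--             counter += (right - left + 1)
--
--         else:
--             while string[left] != string[right]:
--                 distinct_set.remove(string[left])
--                 left += 1
--             left += 1
--
--         right += 1
--
--     return counter
-- ===== SOURCE B (Python) =====
-- def count_distinct_substrings(string):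
--     last = {}
--     left = 0
--     counter = 0
--     for right, c in enumerate(string):
--         if last.get(c, -1) < left:
--             counter += right - left + 1
--         else:
--             left = last[c] + 1
--         last[c] = right
--     return counter
-- ===== Notes on version B (the rewrite author's own statement) =====
-- stated objective: faster
-- what changed: Replaces the membership set plus inner shrink-while-loop with a dict mapping each char to its most recent index, so the left pointer jumps directly to last[c]+1 in O(1) instead of scanning and removing char by char.
import Mathlib
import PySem

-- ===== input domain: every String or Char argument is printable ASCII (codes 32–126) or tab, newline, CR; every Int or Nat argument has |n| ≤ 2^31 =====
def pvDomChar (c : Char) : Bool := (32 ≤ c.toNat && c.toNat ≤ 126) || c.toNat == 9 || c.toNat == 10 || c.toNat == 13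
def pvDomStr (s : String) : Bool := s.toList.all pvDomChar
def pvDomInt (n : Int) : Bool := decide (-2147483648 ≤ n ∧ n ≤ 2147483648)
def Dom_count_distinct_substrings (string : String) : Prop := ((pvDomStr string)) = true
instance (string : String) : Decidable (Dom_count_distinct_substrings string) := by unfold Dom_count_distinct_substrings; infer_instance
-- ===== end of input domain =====

-- B replaces A's membership set and inner shrink loop by a last-index dict with a direct O(1) jump of the left pointer (alternative algorithm, same asymptotic cost).

-- ===== PORT A =====
-- inner 'while string[left] != string[right]: distinct_set.remove(string[left]); left += 1' then 'left += 1';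
-- fuel bounds the scan (the character at the window's right end always stops it); set.remove is exact via discard
-- because the scanned character is always a member of the set here (window invariant).
def pvAInner (cs : List Char) (c : Char) : Nat → PySem.Set Char → Nat → PySem.Set Char × Nat
  | 0, s, left => (s, left)
  | fuel+1, s, left =>
    if cs.getD left ' ' ≠ c then
      pvAInner cs c fuel (PySem.Set.discard s (cs.getD left ' ')) (left+1)
    else
      (s, left + 1)

-- outer 'while right < n', fuel = n - right; string[right] never out of range here, so getD is exact
def pvAOuter (cs : List Char) : Nat → Nat → Int → PySem.Set Char → Nat → Int
  | 0, _, counter, _, _ => counter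
  | fuel+1, right, counter, s, left =>
    let c := cs.getD right ' '
    if c ∉ s then
      pvAOuter cs fuel (right+1) (counter + ((right : Int) - (left : Int) + 1)) (PySem.Set.add s c) left
    else
      let r := pvAInner cs c cs.length s left
      pvAOuter cs fuel (right+1) counter r.1 r.2

def count_distinct_substrings (string : String) : Int :=
  pvAOuter string.toList string.toList.length 0 0 PySem.Set.empty 0

-- ===== PORT B =====
-- 'for right, c in enumerate(string)' carrying right as a counter; last.get(c, -1) is Dict.getD
def pvBLoop : List Char → Int → PySem.Dict Char Int → Int → Int → Int
  | [], _, _, _, counter => counter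
  | c :: rest, right, last, left, counter =>
    if last.getD c (-1) < left then
      pvBLoop rest (right+1) (last.insert c right) left (counter + (right - left + 1))
    else
      pvBLoop rest (right+1) (last.insert c right) (last.getD c (-1) + 1) counter

def count_distinct_substrings_alt (string : String) : Int :=
  pvBLoop string.toList 0 PySem.Dict.empty 0 0

-- ===== PRECONDITION & SPEC =====
def Spec_count_distinct_substrings (string : String) (out : Int) : Prop := out = count_distinct_substrings_alt string
instance (string : String) (out : Int) : Decidable (Spec_count_distinct_substrings string out) := by unfold Spec_count_distinct_substrings; infer_instance

-- ===== CLAIM (what is proved, stated in full; the proofs are below) =====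
def Claim_equal_count_distinct_substrings : Prop := ∀ (string : String), Dom_count_distinct_substrings string → Spec_count_distinct_substrings string (count_distinct_substrings string)

-- ===== LEMMAS AND PROOFS =====

-- index of the last occurrence of x among cs[0..r), or -1
def pvLastOcc (cs : List Char) : Nat → Char → Int
  | 0, _ => -1
  | r+1, x => if cs.getD r ' ' = x then ((r : Nat) : Int) else pvLastOcc cs r x

lemma pvLastOcc_spec (cs : List Char) (r : Nat) (x : Char) :
    pvLastOcc cs r x = -1 ∨
      ∃ k : Nat, pvLastOcc cs r x = (k : Int) ∧ k < r ∧ cs.getD k ' ' = x := by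
  induction r with
  | zero => left; rfl
  | succ r ih =>
    by_cases h : cs.getD r ' ' = x
    · right; exact ⟨r, by simp only [pvLastOcc]; rw [if_pos h], by omega, h⟩
    · rcases ih with h' | ⟨k, hk1, hk2, hk3⟩
      · left; simp only [pvLastOcc]; rw [if_neg h]; exact h'
      · right; exact ⟨k, by simp only [pvLastOcc]; rw [if_neg h]; exact hk1, by omega, hk3⟩

lemma pvLastOcc_ge (cs : List Char) {r i : Nat} {x : Char} (h : i < r)
    (hx : cs.getD i ' ' = x) : (i : Int) ≤ pvLastOcc cs r x := by
  induction r with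
  | zero => omega
  | succ r ih =>
    by_cases hr : cs.getD r ' ' = x
    · simp only [pvLastOcc]; rw [if_pos hr]; exact_mod_cast Nat.le_of_lt_succ h
    · have hir : i < r := by
        rcases Nat.lt_succ_iff_lt_or_eq.mp h with h' | h'
        · exact h'
        · subst h'; exact absurd hx hr
      simp only [pvLastOcc]; rw [if_neg hr]; exact ih hir

lemma pvAInner_spec (cs : List Char) (c : Char) :
    ∀ (fuel left j : Nat) (s : PySem.Set Char),
      left ≤ j → j < left + fuel → cs.getD j ' ' = c →
      (∀ i, left ≤ i → i < j → cs.getD i ' ' ≠ c) →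
      (pvAInner cs c fuel s left).2 = j + 1 ∧
      (∀ x, x ∈ (pvAInner cs c fuel s left).1 ↔
        x ∈ s ∧ ∀ i, left ≤ i → i < j → cs.getD i ' ' ≠ x) := by
  intro fuel
  induction fuel with
  | zero => intro left j s h1 h2 _ _; omega
  | succ fuel ih =>
    intro left j s h1 h2 h3 h4
    by_cases hc : cs.getD left ' ' = c
    · have hj : j = left := by
        by_contra hne
        exact h4 left le_rfl (by omega) hc
      subst hj
      have hred : pvAInner cs c (fuel+1) s j = (s, j + 1) := by
        simp only [pvAInner]; rw [if_neg (not_not_intro hc)]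
      rw [hred]
      refine ⟨rfl, fun x => ?_⟩
      constructor
      · intro hx; exact ⟨hx, fun i hi1 hi2 => by omega⟩
      · intro hx; exact hx.1
    · have hj1 : left + 1 ≤ j := by
        rcases Nat.lt_or_ge left j with h' | h'
        · omega
        · have : j = left := by omega
          subst this; exact absurd h3 hc
      have hstep : pvAInner cs c (fuel+1) s left
          = pvAInner cs c fuel (PySem.Set.discard s (cs.getD left ' ')) (left+1) := by
        simp only [pvAInner]; rw [if_pos hc]
      obtain ⟨ih1, ih2⟩ := ih (left+1) j (PySem.Set.discard s (cs.getD left ' '))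
        hj1 (by omega) h3 (fun i hi1 hi2 => h4 i (by omega) hi2)
      rw [hstep]
      refine ⟨ih1, fun x => ?_⟩
      rw [ih2 x, PySem.Set.mem_discard]
      constructor
      · rintro ⟨⟨hxs, hxne⟩, hall⟩
        refine ⟨hxs, fun i hi1 hi2 => ?_⟩
        rcases Nat.lt_or_ge left i with h' | h'
        · exact hall i (by omega) hi2
        · have : i = left := by omega
          subst this
          intro heq; exact hxne heq.symm
      · rintro ⟨hxs, hall⟩
        refine ⟨⟨hxs, fun heq => hall left le_rfl (by omega) heq.symm⟩,
          fun i hi1 hi2 => hall i (by omega) hi2⟩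

lemma pvMain (cs : List Char) :
    ∀ (fuel right leftA : Nat) (s : PySem.Set Char) (last : PySem.Dict Char Int) (counter : Int),
      fuel = cs.length - right → right ≤ cs.length → leftA ≤ right →
      (∀ x, x ∈ s ↔ ∃ i, leftA ≤ i ∧ i < right ∧ cs.getD i ' ' = x) →
      (∀ x, last.getD x (-1) = pvLastOcc cs right x) →
      (∀ i j, leftA ≤ i → i < j → j < right → cs.getD i ' ' ≠ cs.getD j ' ') →
      pvAOuter cs fuel right counter s leftA
        = pvBLoop (cs.drop right) (right : Int) last (leftA : Int) counter := by
  intro fuel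
  induction fuel with
  | zero =>
    intro right leftA s last counter hf h1 h2 _ _ _
    have hr : right = cs.length := by omega
    subst hr
    simp [pvAOuter, pvBLoop, List.drop_length]
  | succ fuel ih =>
    intro right leftA s last counter hf h1 h2 hs hlast hdist
    have hrn : right < cs.length := by omega
    set c := cs.getD right ' ' with hcdef
    have hdrop : cs.drop right = c :: cs.drop (right+1) := by
      rw [List.drop_eq_getElem_cons hrn, hcdef, List.getD_eq_getElem cs ' ' hrn]
    have hlast_inv : ∀ x, (last.insert c (right : Int)).getD x (-1) = pvLastOcc cs (right+1) x := by
      intro x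
      rw [PySem.Dict.getD_insert]
      by_cases hx : x = c
      · subst hx; simp [pvLastOcc, hcdef]
      · rw [if_neg hx, hlast x]
        have hne : ¬ cs.getD right ' ' = x := fun h => hx ((hcdef.trans h).symm)
        simp only [pvLastOcc]; rw [if_neg hne]
    have hBcond : (last.getD c (-1) < (leftA : Int)) ↔ c ∉ s := by
      rw [hlast c]
      constructor
      · intro hlt hmem
        obtain ⟨i, hi1, hi2, hi3⟩ := (hs c).mp hmem
        have := pvLastOcc_ge cs hi2 hi3
        omega
      · intro hnot
        by_contra hge
        rw [not_lt] at hge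
        rcases pvLastOcc_spec cs right c with h' | ⟨k, hk1, hk2, hk3⟩
        · omega
        · rw [hk1] at hge
          exact hnot ((hs c).mpr ⟨k, by exact_mod_cast hge, hk2, hk3⟩)
    by_cases hmem : c ∈ s
    · -- duplicate in window: A runs the inner shrink loop, B jumps
      have hBc : ¬ (last.getD c (-1) < (leftA : Int)) := fun h => (hBcond.mp h) hmem
      -- the unique occurrence of c in the window
      have hge : (leftA : Int) ≤ pvLastOcc cs right c := by
        rw [hlast c] at hBc; omega
      rcases pvLastOcc_spec cs right c with h' | ⟨k, hk1, hk2, hk3⟩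
      · omega
      have hkA : leftA ≤ k := by rw [hk1] at hge; exact_mod_cast hge
      have hfirst : ∀ i, leftA ≤ i → i < k → cs.getD i ' ' ≠ c :=
        fun i hi1 hi2 heq => hdist i k hi1 hi2 hk2 (heq.trans hk3.symm)
      obtain ⟨hin2, hin1⟩ := pvAInner_spec cs c cs.length leftA k s hkA (by omega) hk3 hfirst
      have hstepA : pvAOuter cs (fuel+1) right counter s leftA
          = pvAOuter cs fuel (right+1) counter (pvAInner cs c cs.length s leftA).1
              (pvAInner cs c cs.length s leftA).2 := by
        simp only [pvAOuter]
        rw [← hcdef, if_neg (not_not_intro hmem)]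
      have hstepB : pvBLoop (cs.drop right) (right : Int) last (leftA : Int) counter
          = pvBLoop (cs.drop (right+1)) ((right : Int)+1) (last.insert c (right : Int))
              (last.getD c (-1) + 1) counter := by
        rw [hdrop]; simp only [pvBLoop, if_neg hBc]
      rw [hstepA, hstepB, hin2, hlast c, hk1]
      have hcast : ((k : Int) + 1) = ((k + 1 : Nat) : Int) := by push_cast; ring
      rw [hcast]
      have hcast2 : ((right : Int) + 1) = ((right + 1 : Nat) : Int) := by push_cast; ring
      rw [hcast2]
      apply ih (right+1) (k+1) _ _ counter (by omega) (by omega) (by omega)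
      · -- set invariant for the new window [k+1, right+1)
        intro x
        rw [hin1 x]
        constructor
        · rintro ⟨hxs, hall⟩
          obtain ⟨i0, hi1, hi2, hi3⟩ := (hs x).mp hxs
          rcases Nat.lt_or_ge i0 k with h' | h'
          · exact absurd hi3 (hall i0 hi1 h')
          · rcases Nat.eq_or_lt_of_le h' with h'' | h''
            · -- i0 = k: x = c, witnessed at right
              refine ⟨right, by omega, by omega, ?_⟩
              have hxc : x = c := by rw [← hi3, ← h'', hk3]
              rw [← hcdef, hxc]
            · exact ⟨i0, by omega, by omega, hi3⟩
        · rintro ⟨i, hi1, hi2, hi3⟩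
          rcases Nat.lt_or_ge i right with h' | h'
          · refine ⟨(hs x).mpr ⟨i, by omega, h', hi3⟩, fun i' h1' h2' => ?_⟩
            intro heq
            exact hdist i' i h1' (by omega) h' (heq.trans hi3.symm)
          · have hir : i = right := by omega
            rw [hir, ← hcdef] at hi3
            exact ⟨hi3 ▸ hmem, fun i' h1' h2' => hi3 ▸ hfirst i' h1' h2'⟩
      · exact hlast_inv
      · -- distinctness of the new window
        intro i j hi1 hij hj
        rcases Nat.lt_or_ge j right with h' | h'
        · exact hdist i j (by omega) hij h'
        · have hjr : j = right := by omega
          rw [hjr, ← hcdef]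
          intro heq
          have hgei := pvLastOcc_ge cs (show i < right by omega) heq
          rw [hk1] at hgei
          omega
    · -- new character: both count right-left+1
      have hBc : last.getD c (-1) < (leftA : Int) := hBcond.mpr hmem
      have hstepA : pvAOuter cs (fuel+1) right counter s leftA
          = pvAOuter cs fuel (right+1) (counter + ((right : Int) - (leftA : Int) + 1))
              (PySem.Set.add s c) leftA := by
        simp only [pvAOuter]
        rw [← hcdef, if_pos hmem]
      have hstepB : pvBLoop (cs.drop right) (right : Int) last (leftA : Int) counter
          = pvBLoop (cs.drop (right+1)) ((right : Int)+1) (last.insert c (right : Int))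
              (leftA : Int) (counter + ((right : Int) - (leftA : Int) + 1)) := by
        rw [hdrop]; simp only [pvBLoop, if_pos hBc]
      rw [hstepA, hstepB]
      have hcast2 : ((right : Int) + 1) = ((right + 1 : Nat) : Int) := by push_cast; ring
      rw [hcast2]
      apply ih (right+1) leftA _ _ _ (by omega) (by omega) (by omega)
      · intro x
        rw [PySem.Set.mem_add]
        constructor
        · rintro (hx | hx)
          · obtain ⟨i, hi1, hi2, hi3⟩ := (hs x).mp hx
            exact ⟨i, hi1, by omega, hi3⟩
          · exact ⟨right, by omega, by omega, by rw [← hcdef, hx]⟩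
        · rintro ⟨i, hi1, hi2, hi3⟩
          rcases Nat.lt_or_ge i right with h' | h'
          · exact Or.inl ((hs x).mpr ⟨i, hi1, h', hi3⟩)
          · have hir : i = right := by omega
            rw [hir, ← hcdef] at hi3
            right; exact hi3.symm
      · exact hlast_inv
      · intro i j hi1 hij hj
        rcases Nat.lt_or_ge j right with h' | h'
        · exact hdist i j hi1 hij h'
        · have hjr : j = right := by omega
          rw [hjr, ← hcdef]
          intro heq
          exact hmem ((hs c).mpr ⟨i, hi1, by omega, heq⟩)

-- ===== VERDICT (by name: the statement is the Claim_ definition above) =====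
theorem count_distinct_substrings_spec : Claim_equal_count_distinct_substrings := by
  intro string _
  unfold Spec_count_distinct_substrings count_distinct_substrings count_distinct_substrings_alt
  have := pvMain string.toList string.toList.length 0 0 PySem.Set.empty PySem.Dict.empty 0
    (by omega) (by omega) (by omega)
    (by intro x; simp [PySem.Set.empty])
    (by intro x; simp [PySem.Dict.getD_empty, pvLastOcc])
    (by intro i j _ _ h; omega)
  simpa using this
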